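-- pv_equiv track=rewrite | github.com/joshua1602-svg/trakt | engine/gate_4_projection/regime_projector.py | order_fields_by_priority
-- ===== SOURCE A (Python) =====
-- from typing import Dict, Any, List, Optional, Tuple
--
-- def order_fields_by_priority(
--     fields_list: List[Tuple[str, Dict[str, Any]]]
-- ) -> List[Tuple[str, Dict[str, Any]]]:
--     """
--     Order fields by priority (Mandatory first, then Optional), then alphabetically.
--
--     NOTE: This is a FALLBACK method used only when esma_code_order.yaml is unavailable.
--     For production ESMA compliance, always use order_fields_by_template() instead.
--
--     Alphabetic ordering does NOT match ESMA XML schema requirements and may cause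
--     validation failures when generating XML.
--     """
--     mandatory = []
--     optional = []
--
--     for field_name, regime_meta in fields_list:
--         priority = str(regime_meta.get("priority", "")).strip().lower()
--         if priority == "mandatory":
--             mandatory.append((field_name, regime_meta))
--         else:
--             optional.append((field_name, regime_meta))
--
--     # Sort alphabetically within each group
--     mandatory.sort(key=lambda x: x[0])
--     optional.sort(key=lambda x: x[0])
--
--     return mandatory + optional
-- ===== SOURCE B (Python) =====
-- def order_fields_by_priority(fields_list):
--     # Stable insertion sort: build the ordered output incrementally, inserting each
--     # field after all existing entries whose (priority-rank, name) key is <= its key.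
--     keys = []
--     out = []
--     for name, meta in fields_list:
--         k = (0 if str(meta.get("priority", "")).strip().lower() == "mandatory" else 1, name)
--         i = 0
--         while i < len(keys) and keys[i] <= k:
--             i += 1
--         keys.insert(i, k)
--         out.insert(i, (name, meta))
--     return out
-- ===== Notes on version B (the rewrite author's own statement) =====
-- stated objective: alternative
-- what changed: Replaced the partition into mandatory/optional buckets plus two library sorts and a concatenation by a single-pass hand-rolled stable insertion sort that places each field into the growing output by a linear scan on a (priority-rank, name) key.
import Mathlib
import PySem

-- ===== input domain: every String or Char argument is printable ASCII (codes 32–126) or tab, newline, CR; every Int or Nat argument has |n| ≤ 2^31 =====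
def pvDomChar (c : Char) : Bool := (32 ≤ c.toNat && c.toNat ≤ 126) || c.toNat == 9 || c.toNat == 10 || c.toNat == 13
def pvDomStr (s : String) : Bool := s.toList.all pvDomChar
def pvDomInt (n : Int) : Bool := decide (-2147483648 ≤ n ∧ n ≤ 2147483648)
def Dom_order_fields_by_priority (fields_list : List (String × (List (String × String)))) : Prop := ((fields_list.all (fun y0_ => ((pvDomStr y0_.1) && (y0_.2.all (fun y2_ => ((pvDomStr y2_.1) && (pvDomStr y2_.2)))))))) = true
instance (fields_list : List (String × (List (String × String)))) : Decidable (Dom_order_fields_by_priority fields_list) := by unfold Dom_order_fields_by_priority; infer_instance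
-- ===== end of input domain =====

-- B replaces A's partition-into-two-buckets + two library sorts + concatenation by a
-- single-pass hand-rolled stable insertion sort on a (priority-rank, name) key:
-- a different algorithm of simple structure (O(n^2) insertions vs A's sorts), not faster.


-- priority classification shared by both Pythons: str(meta.get("priority","")).strip().lower() == "mandatory"
-- (str(...) is the identity here: the dict's values are strings)
def pvIsMandatory (rm : List (String × String)) : Bool :=
  PySem.Str.lower (PySem.Str.strip (PySem.Dict.getD ⟨rm⟩ "priority" "")) == "mandatory"

-- ===== PORT A =====
-- one pass splitting into the 'mandatory'/'optional' buckets, then list.sort (stable) in each, then concatenation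
def order_fields_by_priority (fields_list : List (String × (List (String × String)))) : List (String × (List (String × String))) :=
  let pair := fields_list.foldl
    (fun (acc : List (String × (List (String × String))) × List (String × (List (String × String)))) f =>
      if pvIsMandatory f.2 then (acc.1 ++ [f], acc.2) else (acc.1, acc.2 ++ [f]))
    ([], [])
  let mandatory := PySem.List.sorted pair.1 (fun x => x.1)
  let optional := PySem.List.sorted pair.2 (fun x => x.1)
  mandatory ++ optional

-- ===== PORT B =====
-- Python tuple comparison (r1,n1) <= (r2,n2) used by Source B's scan
def pvPairLe (a b : Nat × String) : Bool :=
  decide (a.1 < b.1) || (a.1 == b.1 && (decide (a.2 < b.2) || a.2 == b.2))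

-- Source B's inner while-loop + insert: the parallel lists keys/out are kept zipped;
-- scan past every entry whose key is <= k, insert (k, field) there
def pvIns (k : Nat × String) (f : String × (List (String × String)))
    (ys : List ((Nat × String) × (String × (List (String × String))))) :
    List ((Nat × String) × (String × (List (String × String)))) :=
  match ys with
  | [] => [(k, f)]
  | (k', f') :: rest => if pvPairLe k' k then (k', f') :: pvIns k f rest else (k, f) :: (k', f') :: rest

-- one pass over the input, inserting each field with its computed key; return the fields
def order_fields_by_priority_alt (fields_list : List (String × (List (String × String)))) : List (String × (List (String × String))) :=
  (fields_list.foldl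
    (fun acc f => pvIns ((if pvIsMandatory f.2 then 0 else 1), f.1) f acc)
    []).map (fun p => p.2)

-- ===== PRECONDITION & SPEC =====
def Spec_order_fields_by_priority (fields_list : List (String × (List (String × String)))) (out : List (String × (List (String × String)))) : Prop := out = order_fields_by_priority_alt fields_list
instance (fields_list : List (String × (List (String × String)))) (out : List (String × (List (String × String)))) : Decidable (Spec_order_fields_by_priority fields_list out) := by unfold Spec_order_fields_by_priority; infer_instance

-- ===== CLAIM (what is proved, stated in full; the proofs are below) =====
def Claim_equal_order_fields_by_priority : Prop := ∀ (fields_list : List (String × (List (String × String)))), Dom_order_fields_by_priority fields_list → Spec_order_fields_by_priority fields_list (order_fields_by_priority fields_list)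

-- ===== LEMMAS AND PROOFS =====

-- the compound key used by B
def pvKey (f : String × (List (String × String))) : Nat × String :=
  ((if pvIsMandatory f.2 then 0 else 1), f.1)

-- strict lexicographic order on keys
def pvLt (a b : Nat × String) : Bool :=
  decide (a.1 < b.1) || (a.1 == b.1 && decide (a.2 < b.2))

-- 'scan past k' ≤ is the negation of strict <, by trichotomy on both components
theorem pvPairLe_eq_not_lt (a b : Nat × String) : pvPairLe a b = ! pvLt b a := by
  simp only [pvPairLe, pvLt]
  rcases Nat.lt_trichotomy a.1 b.1 with h | h | h
  · simp [h, Nat.lt_asymm h, Nat.ne_of_lt' h]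
  · rcases lt_trichotomy a.2 b.2 with h2 | h2 | h2
    · simp [h, h2, lt_asymm h2]
    · simp [h, h2]
    · simp [h, h2, lt_asymm h2, ne_of_gt h2]
  · have hne : a.1 ≠ b.1 := by omega
    simp [h, Nat.lt_asymm h, hne]

-- pvIns on a keyed list is insertBy on the projected fields; keys stay attached correctly
theorem pvIns_map (f : String × (List (String × String)))
    (ys : List ((Nat × String) × (String × (List (String × String)))))
    (hk : ∀ p ∈ ys, p.1 = pvKey p.2) :
    (pvIns (pvKey f) f ys).map (fun p => p.2)
      = PySem.List.insertBy (fun a b => pvLt (pvKey a) (pvKey b)) f (ys.map (fun p => p.2))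
    ∧ ∀ p ∈ pvIns (pvKey f) f ys, p.1 = pvKey p.2 := by
  induction ys with
  | nil => simp [pvIns, PySem.List.insertBy]
  | cons y ys ih =>
    obtain ⟨k', f'⟩ := y
    have hy : k' = pvKey f' := hk (k', f') (by simp)
    subst hy
    have hrest := ih (fun p hp => hk p (by simp [hp]))
    have hle : pvPairLe (pvKey f') (pvKey f) = ! pvLt (pvKey f) (pvKey f') := pvPairLe_eq_not_lt _ _
    by_cases h : pvLt (pvKey f) (pvKey f') = true
    · constructor
      · simp [pvIns, hle, h, PySem.List.insertBy]
      · intro p hp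
        simp [pvIns, hle, h] at hp
        rcases hp with hp | hp | hp
        · simp [hp]
        · simp [hp]
        · exact hk p (by simp [hp])
    · have hb : pvLt (pvKey f) (pvKey f') = false := by simpa using h
      constructor
      · simp [pvIns, hle, hb, PySem.List.insertBy, hrest.1]
      · intro p hp
        simp [pvIns, hle, hb] at hp
        rcases hp with hp | hp
        · simp [hp]
        · exact hrest.2 p hp

-- B's whole fold, projected, is the fold of insertBy over the fields
theorem alt_eq_foldl_insertBy (xs : List (String × (List (String × String)))) :
    order_fields_by_priority_alt xs
      = xs.foldl (fun acc f => PySem.List.insertBy (fun a b => pvLt (pvKey a) (pvKey b)) f acc) [] := by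
  suffices h : ∀ (ys : List ((Nat × String) × (String × (List (String × String))))),
      (∀ p ∈ ys, p.1 = pvKey p.2) →
      (xs.foldl (fun acc f => pvIns ((if pvIsMandatory f.2 then 0 else 1), f.1) f acc) ys).map (fun p => p.2)
        = xs.foldl (fun acc f => PySem.List.insertBy (fun a b => pvLt (pvKey a) (pvKey b)) f acc)
            (ys.map (fun p => p.2)) by
    simpa [order_fields_by_priority_alt] using h [] (by simp)
  induction xs with
  | nil => intro ys _; simp
  | cons x xs ih =>
    intro ys hk
    have hx : ((if pvIsMandatory x.2 then (0:Nat) else 1), x.1) = pvKey x := rfl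
    simp only [List.foldl_cons, hx]
    rw [ih _ (pvIns_map x ys hk).2, (pvIns_map x ys hk).1]

-- inserting x whose slot is before everything in O stays inside M
theorem insertBy_append_of_all {α : Type} (before : α → α → Bool) (x : α) (M O : List α)
    (h : ∀ y ∈ O, before x y = true) :
    PySem.List.insertBy before x (M ++ O) = PySem.List.insertBy before x M ++ O := by
  induction M with
  | nil =>
    cases O with
    | nil => simp [PySem.List.insertBy]
    | cons z zs => simp [PySem.List.insertBy, h z (by simp)]
  | cons m M ih =>
    by_cases hb : before x m = true
    · simp [PySem.List.insertBy, hb]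
    · simp [PySem.List.insertBy, hb, ih]

-- inserting x whose slot is after everything in M passes M untouched
theorem insertBy_append_of_none {α : Type} (before : α → α → Bool) (x : α) (M O : List α)
    (h : ∀ y ∈ M, before x y = false) :
    PySem.List.insertBy before x (M ++ O) = M ++ PySem.List.insertBy before x O := by
  induction M with
  | nil => simp
  | cons m M ih =>
    have hm : before x m = false := h m (by simp)
    simp only [List.cons_append, PySem.List.insertBy, hm]
    simp only [Bool.false_eq_true, if_false]
    rw [ih (fun y hy => h y (by simp [hy]))]

-- insertBy only looks at 'before x ·' on the list's elements
theorem insertBy_congr {α : Type} (before before' : α → α → Bool) (x : α) (M : List α)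
    (h : ∀ y ∈ M, before x y = before' x y) :
    PySem.List.insertBy before x M = PySem.List.insertBy before' x M := by
  induction M with
  | nil => simp [PySem.List.insertBy]
  | cons m M ih =>
    have hm : before x m = before' x m := h m (by simp)
    simp only [PySem.List.insertBy, hm]
    rw [ih (fun y hy => h y (by simp [hy]))]

-- A's partition loop is a pair of filters
theorem partition_foldl (xs m o : List (String × (List (String × String)))) :
    xs.foldl (fun acc f => if pvIsMandatory f.2 then (acc.1 ++ [f], acc.2) else (acc.1, acc.2 ++ [f])) (m, o)
      = (m ++ xs.filter (fun f => pvIsMandatory f.2), o ++ xs.filter (fun f => !pvIsMandatory f.2)) := by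
  induction xs generalizing m o with
  | nil => simp
  | cons x xs ih =>
    by_cases hp : pvIsMandatory x.2 = true
    · simp [List.foldl_cons, hp, ih]
    · simp only [Bool.not_eq_true] at hp
      simp [List.foldl_cons, hp, ih]

-- the fold of lex-key insertions splits into the two per-rank stable sorts
theorem insert_fold_rank_split (xs : List (String × (List (String × String)))) :
    xs.foldl (fun acc f => PySem.List.insertBy (fun a b => pvLt (pvKey a) (pvKey b)) f acc) []
      = PySem.List.sorted (xs.filter (fun f => pvIsMandatory f.2)) (fun x => x.1)
        ++ PySem.List.sorted (xs.filter (fun f => !pvIsMandatory f.2)) (fun x => x.1) := by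
  have hsapp : ∀ (ys : List (String × (List (String × String)))) (x : String × (List (String × String))),
      PySem.List.sorted (ys ++ [x]) (fun z => z.1)
      = PySem.List.insertBy (fun a b => decide (a.1 < b.1)) x (PySem.List.sorted ys (fun z => z.1)) := by
    intro ys x
    rw [PySem.List.sorted_eq_foldl_insertBy (ys ++ [x]) (fun z => z.1), List.foldl_append,
      ← PySem.List.sorted_eq_foldl_insertBy]
    simp only [List.foldl_cons, List.foldl_nil]
  have hname : ∀ x y : String × (List (String × String)), pvIsMandatory y.2 = pvIsMandatory x.2 →
      pvLt (pvKey x) (pvKey y) = decide (x.1 < y.1) := by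
    intro x y hpy
    simp [pvLt, pvKey, hpy]
  induction xs using List.reverseRecOn with
  | nil => simp [PySem.List.sorted]
  | append_singleton xs x ih =>
    rw [List.foldl_append, List.foldl_cons, List.foldl_nil, ih,
      List.filter_append, List.filter_append]
    simp only [List.filter_cons, List.filter_nil]
    by_cases hp : pvIsMandatory x.2 = true
    · rw [insertBy_append_of_all _ x _ _ (by
        intro y hy
        have hy' : y ∈ xs.filter (fun z => !pvIsMandatory z.2) := (PySem.List.mem_sorted _ _ _ y).mp hy
        have hpy : pvIsMandatory y.2 = false := by simpa using List.of_mem_filter hy'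
        simp [pvLt, pvKey, hp, hpy])]
      rw [insertBy_congr _ (fun a b => decide (a.1 < b.1)) x _ (by
        intro y hy
        have hy' : y ∈ xs.filter (fun z => pvIsMandatory z.2) := (PySem.List.mem_sorted _ _ _ y).mp hy
        have hpy : pvIsMandatory y.2 = true := by simpa using List.of_mem_filter hy'
        exact hname x y (hpy.trans hp.symm))]
      rw [← hsapp]
      simp [hp]
    · simp only [Bool.not_eq_true] at hp
      rw [insertBy_append_of_none _ x _ _ (by
        intro y hy
        have hy' : y ∈ xs.filter (fun z => pvIsMandatory z.2) := (PySem.List.mem_sorted _ _ _ y).mp hy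
        have hpy : pvIsMandatory y.2 = true := by simpa using List.of_mem_filter hy'
        simp [pvLt, pvKey, hp, hpy])]
      rw [insertBy_congr _ (fun a b => decide (a.1 < b.1)) x _ (by
        intro y hy
        have hy' : y ∈ xs.filter (fun z => !pvIsMandatory z.2) := (PySem.List.mem_sorted _ _ _ y).mp hy
        have hpy : pvIsMandatory y.2 = false := by simpa using List.of_mem_filter hy'
        exact hname x y (hpy.trans hp.symm))]
      rw [← hsapp]
      simp [hp]

-- ===== VERDICT (by name: the statement is the Claim_ definition above) =====
theorem order_fields_by_priority_spec : Claim_equal_order_fields_by_priority := by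
  intro fields_list _
  show order_fields_by_priority fields_list = order_fields_by_priority_alt fields_list
  rw [alt_eq_foldl_insertBy, insert_fold_rank_split]
  simp only [order_fields_by_priority]
  rw [partition_foldl fields_list [] []]
  simp
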